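-- pv_equiv track=rewrite | github.com/miliar/Code_Jam_Webscraper | solutions_python/Problem_201/1396.py | aux
-- ===== SOURCE A (Python) =====
-- def to_string(ls):
-- 	output = ''
-- 	i = 0
-- 	while ls[i] == '0':
-- 		i += 1
-- 		if i >= len(ls):
-- 			return '0'
-- 	for c in ls[i:]:
-- 		output = output + c
-- 	return output
--
-- def aux(num):
-- 	ls = [c for c in num]
-- 	if len(num) < 2:
-- 		return num
-- 	for i in range(len(ls) - 1):
-- 		prev = int(ls[i])
-- 		curr = int(ls[i+1])
-- 		if prev > curr:
-- 			prev -= 1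
-- 			ls[i+1:] = ['9' for x in ls[i+1:]]
-- 			ls[i] = str(prev)
-- 	return to_string(ls)
-- ===== SOURCE B (Python) =====
-- def aux(num):
--     if len(num) < 2:
--         return num
--     digs = []
--     cut = None
--     for ch in num:
--         d = int(ch)
--         if digs and digs[-1] > d:
--             cut = len(digs) - 1
--             break
--         digs.append(d)
--     if cut is None:
--         res = num
--     else:
--         while cut > 0 and digs[cut - 1] == digs[cut]:
--             cut -= 1
--         res = num[:cut] + str(digs[cut] - 1) + '9' * (len(num) - cut - 1)
--     res = res.lstrip('0')
--     return res or '0'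
-- ===== Notes on version B (the rewrite author's own statement) =====
-- stated objective: alternative
-- what changed: B is the standard tidy-number algorithm: an early-exit scan to the first digit descent, a backward walk through the run of equal digits to find the right position to decrement, and direct construction by string slicing plus lstrip('0'); A runs a full-length loop mutating a character list in place and rebuilds the string char by char in a separate to_string helper.
-- intended difference: On digit strings whose first descent d[i]>d[i+1] has i>=1 and d[i-1]=d[i] (e.g. '332'), A decrements only position i and returns a still-descending number ('329'), while B walks back through the run of equal digits and returns the intended largest non-decreasing number not exceeding the input ('299'). — e.g. on aux("332"): A returns "329", B returns "299"
import Mathlib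
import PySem

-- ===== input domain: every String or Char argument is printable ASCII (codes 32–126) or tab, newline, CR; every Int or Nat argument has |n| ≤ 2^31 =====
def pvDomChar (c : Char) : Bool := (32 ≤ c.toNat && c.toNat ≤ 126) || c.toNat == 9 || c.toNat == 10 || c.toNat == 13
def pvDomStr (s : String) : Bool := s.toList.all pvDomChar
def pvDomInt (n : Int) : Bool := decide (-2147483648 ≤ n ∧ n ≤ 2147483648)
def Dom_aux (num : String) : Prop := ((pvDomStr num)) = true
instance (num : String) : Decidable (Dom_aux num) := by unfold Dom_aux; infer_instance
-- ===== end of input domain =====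

-- B is the standard tidy-number algorithm (early-exit scan to the first descent, backward walk
-- through the run of equal digits, direct slice construction) instead of A's full-length
-- mutate-the-list loop plus a char-by-char to_string helper; on the D_ inputs B fixes A's
-- missing cascade (objective: alternative).

-- ===== PORT A =====

-- the loop `for i in range(len(ls)-1)` mutating ls in place; fuel = remaining iterations;
-- `none` = int() raised ValueError (excluded by Pre_aux)
def auxLoop : Nat → Nat → List Char → Option (List Char)
  | 0, _, ls => some ls
  | fuel+1, i, ls =>
    -- prev = int(ls[i]); curr = int(ls[i+1])  (indices always in range when called from aux)
    match PySem.Int.ofChars? [ls.getD i ' '], PySem.Int.ofChars? [ls.getD (i+1) ' '] with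
    | some prev, some curr =>
      if curr < prev then        -- prev > curr
        -- ls[i+1:] = ['9' for x in ls[i+1:]]; ls[i] = str(prev-1)
        -- (prev-1 ∈ 0..8 here, so str(prev-1) is the single char headD picks)
        auxLoop fuel (i+1)
          ((ls.take (i+1) ++ List.replicate (ls.length - (i+1)) '9').set i
            ((PySem.Int.toStr (prev - 1)).toList.headD ' '))
      else auxLoop fuel (i+1) ls
    | _, _ => none

-- to_string: the while-loop skipping leading '0's ('0' when it runs off the end),
-- then output = output + c, char by char
def auxToString : List Char → String
  | [] => ""                      -- ls[0] would raise IndexError; unreachable from aux (ls nonempty)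
  | c :: rest =>
    if c = '0' then
      match rest with
      | [] => "0"                 -- i >= len(ls): return '0'
      | _ :: _ => auxToString rest
    else
      (c :: rest).foldl (fun out ch => out.push ch) ""

def aux (num : String) : String :=
  let ls := num.toList
  if ls.length < 2 then num
  else
    match auxLoop (ls.length - 1) 0 ls with
    | some ls' => auxToString ls'
    | none => ""                  -- int() raised ValueError; excluded by Pre_aux

-- ===== PORT B =====

-- the loop `for ch in num` carrying digs; `none` = int() raised ValueError (excluded by
-- Pre_aux), `some none` = loop ran through (cut is None), `some (some (cut, digs))` = break
-- with cut = len(digs)-1 and the digs accumulated so far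
def auxAltScan : List Int → List Char → Option (Option (Nat × List Int))
  | _, [] => some none
  | digs, c :: rest =>
    match PySem.Int.ofChars? [c] with
    | none => none
    | some d =>
      match digs.getLast? with                      -- `if digs and digs[-1] > d`
      | some last =>
        if d < last then some (some (digs.length - 1, digs))
        else auxAltScan (digs ++ [d]) rest
      | none => auxAltScan (digs ++ [d]) rest

-- `while cut > 0 and digs[cut-1] == digs[cut]: cut -= 1`
def auxAltBack : Nat → List Int → Nat
  | 0, _ => 0
  | c+1, digs => if digs.getD c 0 == digs.getD (c+1) 0 then auxAltBack c digs else c+1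

-- res.lstrip('0') (dropWhile of leading '0's is exactly lstrip with the '0' chars argument),
-- then `return res or '0'`
def auxAltFinish (res : List Char) : String :=
  let t := res.dropWhile (· == '0')
  if t.isEmpty then "0" else String.ofList t

def aux_alt (num : String) : String :=
  if num.toList.length < 2 then num
  else
    match auxAltScan [] num.toList with
    | none => ""                  -- ValueError; excluded by Pre_aux
    | some none => auxAltFinish num.toList          -- res = num
    | some (some (cut0, digs)) =>
        let cut := auxAltBack cut0 digs             -- the backward walk
        -- res = num[:cut] + str(digs[cut]-1) + '9'*(len(num)-cut-1)
        auxAltFinish (num.toList.take cut ++ (PySem.Int.toStr (digs.getD cut 0 - 1)).toList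
                        ++ List.replicate (num.toList.length - cut - 1) '9')

-- ===== PRECONDITION & SPEC =====

-- Pre_aux excludes exactly the inputs on which A raises ValueError: a non-digit char that
-- int() reaches before the first digit descent has overwritten the tail with '9's.
def Pre_aux (num : String) : Prop :=
  num.toList.length < 2 ∨ num.toList.all Char.isDigit = true ∨
  ((List.range (num.toList.length - 1)).any (fun i =>
      (num.toList.take (i+2)).all Char.isDigit &&
      decide (num.toList.getD (i+1) ' ' < num.toList.getD i ' '))) = true

instance (num : String) : Decidable (Pre_aux num) := by unfold Pre_aux; infer_instance

def pvWitness_aux : String := ("1000234")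

-- On digit strings whose first descent d[i] > d[i+1] has i ≥ 1 and d[i-1] = d[i] (e.g. "332"),
-- A decrements only position i and returns a still-descending number ("329"), while B walks
-- back through the run of equal digits and returns the intended largest non-decreasing
-- number not exceeding the input ("299").
def D_aux (num : String) : Prop :=
  ((List.range num.toList.length).any (fun i =>
      decide (1 ≤ i) && decide (i+1 < num.toList.length) &&
      (num.toList.take (i+2)).all Char.isDigit &&
      decide (List.Pairwise (· ≤ ·) (num.toList.take (i+1))) &&
      decide (num.toList.getD (i-1) ' ' = num.toList.getD i ' ') &&
      decide (num.toList.getD (i+1) ' ' < num.toList.getD i ' '))) = true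

instance (num : String) : Decidable (D_aux num) := by unfold D_aux; infer_instance

def Spec_aux (num : String) (out : String) : Prop := ¬ D_aux num → out = aux_alt num
instance (num : String) (out : String) : Decidable (Spec_aux num out) := by unfold Spec_aux; infer_instance

def pvDiffWitness_aux : String := ("332")
def pvDiffWitnessOut_aux : String × String := ("329", "299")

-- ===== CLAIM (what is proved, stated in full; the proofs are below) =====
def Claim_unchanged_aux : Prop := ∀ (num : String), Dom_aux num → Pre_aux num → Spec_aux num (aux num)
def Claim_changed_aux : Prop := Dom_aux (pvDiffWitness_aux) ∧ Pre_aux (pvDiffWitness_aux) ∧ D_aux (pvDiffWitness_aux) ∧ aux (pvDiffWitness_aux) = pvDiffWitnessOut_aux.1 ∧ aux_alt (pvDiffWitness_aux) = pvDiffWitnessOut_aux.2 ∧ pvDiffWitnessOut_aux.1 ≠ pvDiffWitnessOut_aux.2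

-- ===== LEMMAS AND PROOFS =====

-- int() on one Dom character succeeds exactly on '0'..'9', with value toNat - 48, in 0..9
lemma dom_digit_char (c : Char) (hc : pvDomChar c = true) (d : Int)
    (hd : PySem.Int.ofChars? [c] = some d) :
    c.isDigit = true ∧ (c.toNat : Int) = d + 48 ∧ 0 ≤ d ∧ d ≤ 9 := by
  have key : ∀ n : Nat, n < 127 →
      (PySem.Int.ofChars? [Char.ofNat n]).isSome = true →
      ((Char.ofNat n).isDigit = true ∧
        ((Char.ofNat n).toNat : Int) = (PySem.Int.ofChars? [Char.ofNat n]).getD 0 + 48 ∧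
        0 ≤ (PySem.Int.ofChars? [Char.ofNat n]).getD 0 ∧
        (PySem.Int.ofChars? [Char.ofNat n]).getD 0 ≤ 9) := by
    decide
  have hlt : c.toNat < 127 := by
    unfold pvDomChar at hc
    simp only [Bool.or_eq_true, Bool.and_eq_true, beq_iff_eq, decide_eq_true_eq] at hc
    omega
  have h := key c.toNat hlt
  rw [Char.ofNat_toNat, hd] at h
  simpa using h (by rfl)

-- getD of an in-range index is a member
lemma getD_mem (l : List Char) (j : Nat) (h : j < l.length) : l.getD j ' ' ∈ l := by
  unfold List.getD
  rw [List.getElem?_eq_getElem h]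
  exact List.getElem_mem h

-- once the scanned window is all '9', A's loop changes nothing
lemma nines_loop (fuel : Nat) : ∀ (i : Nat) (ls : List Char),
    i + fuel + 1 ≤ ls.length → (∀ k, i ≤ k → k < ls.length → ls.getD k ' ' = '9') →
    auxLoop fuel i ls = some ls := by
  induction fuel with
  | zero => intro i ls _ _; rfl
  | succ n ih =>
    intro i ls hlen h9
    have e1 : ls.getD i ' ' = '9' := h9 i (Nat.le_refl i) (by omega)
    have e2 : ls.getD (i+1) ' ' = '9' := h9 (i+1) (by omega) (by omega)
    unfold auxLoop
    rw [e1, e2, show PySem.Int.ofChars? ['9'] = some 9 by decide]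
    simp only [show ¬ (9:Int) < 9 by omega, if_false]
    exact ih (i+1) ls (by omega) (fun k hk hk' => h9 k (by omega) hk')

-- str(p-1) for p ∈ 1..9 is the single char headD picks
lemma toStr_single (p : Int) (h1 : 1 ≤ p) (h9 : p ≤ 9) :
    (PySem.Int.toStr (p - 1)).toList = [(PySem.Int.toStr (p - 1)).toList.headD ' '] := by
  interval_cases p <;> decide

lemma set_take (s : List Char) (i : Nat) (hi : 1 ≤ i) (hlen : i ≤ s.length) (c : Char) :
    (s.take i).set (i-1) c = s.take (i-1) ++ [c] := by
  have h1 : i - 1 < s.length := by omega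
  have ht : s.take i = s.take (i-1) ++ [s[i-1]] := by
    have h := List.take_add_one (l := s) (i := i - 1)
    rw [show i - 1 + 1 = i by omega] at h
    simp [h, List.getElem?_eq_getElem h1]
  rw [ht, List.set_append]
  have hl : (s.take (i-1)).length = i - 1 := by simp; omega
  rw [if_neg (by omega), hl]
  simp

lemma getD_prefix_nines (pre : List Char) (m k : Nat) (h1 : pre.length ≤ k)
    (h2 : k < pre.length + m) : (pre ++ List.replicate m '9').getD k ' ' = '9' := by
  unfold List.getD
  rw [List.getElem?_append_right h1, List.getElem?_replicate, if_pos (by omega)]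
  rfl

-- digs.getLast? picked at index digs.length - 1
lemma getLast?_eq_getD (digs : List Int) (h : digs ≠ []) :
    digs.getLast? = some (digs.getD (digs.length - 1) 0) := by
  have hlen : digs.length - 1 < digs.length := by
    cases digs with | nil => exact absurd rfl h | cons a l => simp
  rw [List.getLast?_eq_getElem?, List.getElem?_eq_getElem hlen]
  simp [List.getD, List.getElem?_eq_getElem hlen]

-- the main correspondence between A's loop and B's scan
lemma main_loop : ∀ (rest : List Char) (digs : List Int) (s : List Char),
    digs ≠ [] → digs.length + rest.length = s.length → rest = s.drop digs.length →
    (∀ j, j < digs.length → PySem.Int.ofChars? [s.getD j ' '] = some (digs.getD j 0)) →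
    (∀ c ∈ s, pvDomChar c = true) →
    auxLoop (s.length - digs.length) (digs.length - 1) s =
      (match auxAltScan digs rest with
       | none => none
       | some none => some s
       | some (some (cut0, digs')) =>
           some (s.take cut0 ++ (PySem.Int.toStr (digs'.getD cut0 0 - 1)).toList
                   ++ List.replicate (s.length - cut0 - 1) '9')) := by
  intro rest
  induction rest with
  | nil =>
    intro digs s hne hlen hdrop hvals hdom
    simp only [auxAltScan]
    rw [show s.length - digs.length = 0 by simp at hlen; omega]
    rfl
  | cons c rest' ih =>
    intro digs s hne hlen hdrop hvals hdom
    have hi1 : 1 ≤ digs.length := by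
      cases digs with | nil => exact absurd rfl hne | cons a l => simp
    set i := digs.length with hi
    have hlen' : i + (rest'.length + 1) = s.length := by simpa using hlen
    have hilt : i < s.length := by omega
    have hsi : s[i]? = some c := by
      have h : (s.drop i)[0]? = s[i+0]? := List.getElem?_drop
      rw [← hdrop] at h
      simpa using h.symm
    have hgetc : s.getD i ' ' = c := by simp [List.getD, hsi]
    have hdrop' : rest' = s.drop (i+1) := by
      have h : List.drop 1 (List.drop i s) = List.drop (i+1) s := by
        rw [List.drop_drop]
      rw [← hdrop] at h
      simpa using h
    have hprev : PySem.Int.ofChars? [s.getD (i-1) ' '] = some (digs.getD (i-1) 0) :=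
      hvals (i-1) (by omega)
    rw [show s.length - i = (s.length - (i+1)) + 1 by omega]
    unfold auxLoop
    rw [show i - 1 + 1 = i by omega, hprev, hgetc]
    cases hc : PySem.Int.ofChars? [c] with
    | none => simp [auxAltScan, hc]
    | some d =>
      simp only [auxAltScan, hc, getLast?_eq_getD digs hne]
      set prev := digs.getD (i-1) 0 with hprevdef
      -- bounds on prev and d (Dom characters)
      have hmemp : s.getD (i-1) ' ' ∈ s := getD_mem s (i-1) (by omega)
      have hmemc : c ∈ s := by
        obtain ⟨h, he⟩ := List.getElem?_eq_some_iff.mp hsi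
        exact he ▸ List.getElem_mem h
      obtain ⟨_, _, hp0, hp9⟩ := dom_digit_char _ (hdom _ hmemp) prev hprev
      obtain ⟨_, _, hd0, _⟩ := dom_digit_char _ (hdom _ hmemc) d hc
      by_cases hlt : d < prev
      · -- descent found at loop index i-1
        rw [if_pos hlt, if_pos hlt]
        have hprev1 : 1 ≤ prev := by omega
        have hset : (s.take i ++ List.replicate (s.length - i) '9').set (i-1)
              ((PySem.Int.toStr (prev - 1)).toList.headD ' ')
            = s.take (i-1) ++ (PySem.Int.toStr (prev - 1)).toList
                ++ List.replicate (s.length - i) '9' := by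
          rw [List.set_append, if_pos (by simp; omega), set_take s i hi1 (by omega),
              ← toStr_single prev hprev1 hp9]
        rw [hset]
        have hpre_len : (s.take (i-1) ++ (PySem.Int.toStr (prev - 1)).toList).length = i := by
          rw [toStr_single prev hprev1 hp9]
          simp
          omega
        rw [nines_loop (s.length - (i+1)) i _ (by simp at hpre_len ⊢; omega)
              (by
                intro k hk hk'
                apply getD_prefix_nines
                · simp at hpre_len ⊢; omega
                · simp at hpre_len hk' ⊢; omega)]
        show some _ = some (s.take (i-1) ++ (PySem.Int.toStr (prev - 1)).toList
                   ++ List.replicate (s.length - (i-1) - 1) '9')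
        rw [show s.length - (i-1) - 1 = s.length - i by omega]
      · rw [if_neg hlt, if_neg hlt]
        have h := ih (digs ++ [d]) s (by simp) (by simp; omega)
          (by simpa using hdrop')
          (by
            intro j hj
            simp only [List.length_append, List.length_cons, List.length_nil] at hj
            by_cases hji : j < i
            · rw [List.getD_append _ _ _ _ (by omega)]
              exact hvals j hji
            · have hji' : j = i := by omega
              subst hji'
              rw [hgetc, hc]
              unfold List.getD
              rw [List.getElem?_append_right (by omega)]
              rw [show i - digs.length = 0 by omega]
              simp)
          hdom
        simp only [List.length_append, List.length_cons, List.length_nil] at h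
        rw [show i + 1 - 1 = i by omega] at h
        rw [show s.length - (i+1) = s.length - (i + 1) by rfl]
        exact h

-- properties of the scan's break state
lemma scan_props : ∀ (rest : List Char) (digs : List Int) (s : List Char),
    digs ≠ [] → digs.length + rest.length = s.length → rest = s.drop digs.length →
    (∀ j, j < digs.length → PySem.Int.ofChars? [s.getD j ' '] = some (digs.getD j 0)) →
    (∀ j, j + 1 < digs.length → digs.getD j 0 ≤ digs.getD (j+1) 0) →
    ∀ cut0 digs', auxAltScan digs rest = some (some (cut0, digs')) →
      digs'.length = cut0 + 1 ∧ cut0 + 1 < s.length ∧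
      (∀ j, j < digs'.length → PySem.Int.ofChars? [s.getD j ' '] = some (digs'.getD j 0)) ∧
      (∀ j, j + 1 < digs'.length → digs'.getD j 0 ≤ digs'.getD (j+1) 0) ∧
      (∃ dnext, PySem.Int.ofChars? [s.getD (cut0+1) ' '] = some dnext ∧
        dnext < digs'.getD cut0 0) := by
  intro rest
  induction rest with
  | nil =>
    intro digs s _ _ _ _ _ cut0 digs' h
    simp [auxAltScan] at h
  | cons c rest' ih =>
    intro digs s hne hlen hdrop hvals hmono cut0 digs' h
    have hi1 : 1 ≤ digs.length := by
      cases digs with | nil => exact absurd rfl hne | cons a l => simp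
    set i := digs.length with hi
    have hlen' : i + (rest'.length + 1) = s.length := by simpa using hlen
    have hsi : s[i]? = some c := by
      have h' : (s.drop i)[0]? = s[i+0]? := List.getElem?_drop
      rw [← hdrop] at h'
      simpa using h'.symm
    have hgetc : s.getD i ' ' = c := by simp [List.getD, hsi]
    have hdrop' : rest' = s.drop (i+1) := by
      have h' : List.drop 1 (List.drop i s) = List.drop (i+1) s := by rw [List.drop_drop]
      rw [← hdrop] at h'
      simpa using h'
    unfold auxAltScan at h
    cases hc : PySem.Int.ofChars? [c] with
    | none => rw [hc] at h; simp at h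
    | some d =>
      rw [hc, getLast?_eq_getD digs hne] at h
      simp only [] at h
      by_cases hlt : d < digs.getD (i-1) 0
      · rw [if_pos hlt] at h
        have h' : i - 1 = cut0 ∧ digs = digs' := by simpa using h
        obtain ⟨hcut, hdigs⟩ := h'
        subst hcut
        subst hdigs
        refine ⟨by omega, by omega, hvals, hmono, d, ?_, ?_⟩
        · rw [show i - 1 + 1 = i by omega, hgetc]
          exact hc
        · exact hlt
      · rw [if_neg hlt] at h
        exact ih (digs ++ [d]) s (by simp) (by simp; omega) (by simpa using hdrop')
          (by
            intro j hj
            simp only [List.length_append, List.length_cons, List.length_nil] at hj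
            by_cases hji : j < i
            · rw [List.getD_append _ _ _ _ (by omega)]
              exact hvals j hji
            · have hji' : j = i := by omega
              subst hji'
              rw [hgetc, hc]
              unfold List.getD
              rw [List.getElem?_append_right (by omega)]
              rw [show i - digs.length = 0 by omega]
              simp)
          (by
            intro j hj
            simp only [List.length_append, List.length_cons, List.length_nil] at hj
            by_cases hj2 : j + 1 < i
            · rw [List.getD_append _ _ _ _ (by omega), List.getD_append _ _ _ _ (by omega)]
              exact hmono j hj2
            · have hj1 : j + 1 = i := by omega
              rw [List.getD_append _ _ _ _ (by omega)]
              have hd' : (digs ++ [d]).getD (j+1) 0 = d := by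
                unfold List.getD
                rw [List.getElem?_append_right (by omega)]
                rw [show j + 1 - digs.length = 0 by omega]
                simp
              rw [hd']
              have he : digs.getD j 0 = digs.getD (i-1) 0 := by rw [show j = i - 1 by omega]
              rw [he]
              omega)
          cut0 digs' h

-- output = output + c, char by char, is String.ofList
lemma foldl_push (l : List Char) : ∀ (s : String),
    l.foldl (fun out ch => out.push ch) s = s ++ String.ofList l := by
  induction l with
  | nil => intro s; apply String.ext; simp
  | cons c tl ih =>
    intro s
    simp only [List.foldl]
    rw [ih]
    apply String.ext
    simp

lemma toString_eq_finish : ∀ (ls : List Char), ls ≠ [] → auxToString ls = auxAltFinish ls := by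
  intro ls
  induction ls with
  | nil => intro h; exact absurd rfl h
  | cons c rest ih =>
    intro _
    unfold auxToString auxAltFinish
    by_cases hc : c = '0'
    · subst hc
      cases rest with
      | nil => simp
      | cons y tl =>
        rw [if_pos rfl]
        rw [ih (by simp)]
        unfold auxAltFinish
        simp
    · rw [if_neg hc, foldl_push]
      rw [List.dropWhile_cons_of_neg (by simpa using hc)]
      simp only [List.isEmpty_cons]
      apply String.ext
      simp

-- str(n) is never the empty string
lemma tdc_suffix (b : Nat) : ∀ (f n : Nat) (acc : List Char),
    ∃ pre, Nat.toDigitsCore b f n acc = pre ++ acc := by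
  intro f
  induction f with
  | zero => intro n acc; exact ⟨[], rfl⟩
  | succ f ih =>
    intro n acc
    unfold Nat.toDigitsCore
    simp only []
    split
    · exact ⟨[(n % b).digitChar], rfl⟩
    · obtain ⟨pre, hp⟩ := ih (n / b) ((n % b).digitChar :: acc)
      exact ⟨pre ++ [(n % b).digitChar], by simpa using hp⟩

lemma toStr_toList_ne_nil (n : Int) : (PySem.Int.toStr n).toList ≠ [] := by
  rw [PySem.Int.toList_toStr]
  unfold PySem.Int.toChars
  split
  · simp
  · unfold Nat.toDigits Nat.toDigitsCore
    simp only []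
    split
    · simp
    · obtain ⟨pre, hp⟩ := tdc_suffix 10 n.toNat (n.toNat / 10) [(n.toNat % 10).digitChar]
      rw [hp]; simp


-- chars with equal codes are equal
lemma char_eq_of_toNat_eq (a b : Char) (h : a.toNat = b.toNat) : a = b :=
  Char.ext (UInt32.toNat_inj.mp h)

-- char order from code order
lemma char_le_of_toNat_le (a b : Char) (h : a.toNat ≤ b.toNat) : a ≤ b :=
  Char.le_def.mpr (UInt32.le_iff_toNat_le.mpr h)

lemma char_lt_of_toNat_lt (a b : Char) (h : a.toNat < b.toNat) : a < b :=
  Char.lt_def.mpr (UInt32.lt_iff_toNat_lt.mpr h)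

-- getD of an in-range index is the element
lemma getD_eq_getElem (l : List Char) (j : Nat) (h : j < l.length) : l.getD j ' ' = l[j] := by
  unfold List.getD
  rw [List.getElem?_eq_getElem h]
  rfl

-- pointwise digit test gives `all isDigit` on a prefix
lemma take_all_digits (l : List Char) (k : Nat)
    (h : ∀ j, j < k → j < l.length → (l.getD j ' ').isDigit = true) :
    (l.take k).all Char.isDigit = true := by
  rw [List.all_eq_true]
  intro x hx
  obtain ⟨j, hj, rfl⟩ := List.mem_iff_getElem.mp hx
  have hjk : j < k := by simp at hj; omega
  have hjl : j < l.length := by simp at hj; omega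
  have hd := h j hjk hjl
  unfold List.getD at hd
  rw [List.getElem?_eq_getElem hjl] at hd
  rw [List.getElem_take]
  simpa using hd

-- ===== VERDICT (by name: the statement is the Claim_ definition above) =====
theorem aux_spec : Claim_unchanged_aux := by
  intro num hdom _hpre
  unfold Spec_aux
  intro hND
  have hdom' : ∀ c ∈ num.toList, pvDomChar c = true := by
    unfold Dom_aux pvDomStr at hdom
    simpa [List.all_eq_true] using hdom
  have hND' : ¬ ((List.range num.toList.length).any (fun i =>
      decide (1 ≤ i) && decide (i+1 < num.toList.length) &&
      (num.toList.take (i+2)).all Char.isDigit &&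
      decide (List.Pairwise (· ≤ ·) (num.toList.take (i+1))) &&
      decide (num.toList.getD (i-1) ' ' = num.toList.getD i ' ') &&
      decide (num.toList.getD (i+1) ' ' < num.toList.getD i ' '))) = true := by
    intro h
    exact hND h
  simp only [aux, aux_alt]
  cases hs : num.toList with
  | nil => simp
  | cons c0 rest =>
    rw [hs] at hdom' hND'
    cases rest with
    | nil => simp
    | cons c1 tl =>
      rw [if_neg (by simp), if_neg (by simp)]
      cases hc0 : PySem.Int.ofChars? [c0] with
      | none =>
        rw [show (c0 :: c1 :: tl).length - 1 = ((c0 :: c1 :: tl).length - 1 - 1) + 1 by simp]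
        unfold auxLoop
        simp [auxAltScan, hc0]
      | some d0 =>
        have hvals0 : ∀ j, j < ([d0] : List Int).length →
            PySem.Int.ofChars? [(c0 :: c1 :: tl).getD j ' '] = some (([d0] : List Int).getD j 0) := by
          intro j hj
          have hj0 : j = 0 := by simpa using hj
          subst hj0
          simpa using hc0
        have hm := main_loop (c1 :: tl) [d0] (c0 :: c1 :: tl) (by simp) (by simp; omega)
          (by simp) hvals0 hdom'
        simp only [List.length_cons, List.length_nil, Nat.zero_add, Nat.add_sub_cancel,
          Nat.sub_self] at hm ⊢
        rw [hm]
        rw [show auxAltScan [] (c0 :: c1 :: tl) = auxAltScan [d0] (c1 :: tl) by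
          unfold auxAltScan
          rw [hc0]
          rfl]
        cases hscan : auxAltScan [d0] (c1 :: tl) with
        | none => simp
        | some o =>
          cases o with
          | none =>
            simp only []
            exact toString_eq_finish _ (by simp)
          | some cp =>
            obtain ⟨cut0, digs'⟩ := cp
            obtain ⟨hdlen, hcutlt, hvals', hmono', dn, hdn, hdnlt⟩ :=
              scan_props (c1 :: tl) [d0] (c0 :: c1 :: tl) (by simp) (by simp; omega) (by simp)
                hvals0 (by intro j hj; simp at hj) cut0 digs' hscan
            -- digit facts about the scanned prefix
            have hcd : ∀ j, j < digs'.length →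
                ((c0 :: c1 :: tl).getD j ' ').isDigit = true ∧
                (((c0 :: c1 :: tl).getD j ' ').toNat : Int) = digs'.getD j 0 + 48 ∧
                0 ≤ digs'.getD j 0 ∧ digs'.getD j 0 ≤ 9 := by
              intro j hj
              have hjlt : j < (c0 :: c1 :: tl).length := by simp at hcutlt ⊢; omega
              exact dom_digit_char _ (hdom' _ (getD_mem _ j hjlt)) _ (hvals' j hj)
            have hnext := dom_digit_char _ (hdom' _ (getD_mem _ (cut0+1) hcutlt)) _ hdn
            -- the backward walk stays put, else D_ would hold
            have hback : auxAltBack cut0 digs' = cut0 := by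
              by_cases hc0z : cut0 = 0
              · rw [hc0z]; rfl
              · obtain ⟨k, hk⟩ := Nat.exists_eq_succ_of_ne_zero hc0z
                rw [hk]
                unfold auxAltBack
                rw [if_neg ?_]
                intro hbeq
                rw [beq_iff_eq] at hbeq
                have hbeq' : digs'.getD (cut0 - 1) 0 = digs'.getD cut0 0 := by
                  rw [hk]
                  simpa using hbeq
                apply hND'
                rw [List.any_eq_true]
                refine ⟨cut0, List.mem_range.mpr (by simp at hcutlt ⊢; omega), ?_⟩
                simp only [Bool.and_eq_true, decide_eq_true_eq]
                refine ⟨⟨⟨⟨⟨by omega, by simpa using hcutlt⟩, ?_⟩, ?_⟩, ?_⟩, ?_⟩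
                · -- all of take (cut0+2) are digits
                  apply take_all_digits
                  intro j hj hjl
                  by_cases hj' : j < digs'.length
                  · exact (hcd j hj').1
                  · have hj'' : j = cut0 + 1 := by omega
                    subst hj''
                    exact hnext.1
                · -- the scanned prefix is non-decreasing in char code
                  apply List.IsChain.pairwise
                  rw [List.isChain_iff_getElem]
                  intro j hj
                  have hjlt : j < cut0 := by
                    simp at hcutlt hj ⊢
                    omega
                  rw [List.getElem_take, List.getElem_take]
                  apply char_le_of_toNat_le
                  have hjs : j + 1 < (c0 :: c1 :: tl).length := by simp at hcutlt ⊢; omega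
                  obtain ⟨_, h1, _, _⟩ := hcd j (by omega)
                  obtain ⟨_, h2, _, _⟩ := hcd (j+1) (by omega)
                  have h3 := hmono' j (by omega)
                  rw [getD_eq_getElem _ j (by omega)] at h1
                  rw [getD_eq_getElem _ (j+1) hjs] at h2
                  omega
                · -- equal run: chars at cut0-1 and cut0 coincide
                  apply char_eq_of_toNat_eq
                  obtain ⟨_, h1, _, _⟩ := hcd (cut0-1) (by omega)
                  obtain ⟨_, h2, _, _⟩ := hcd cut0 (by omega)
                  omega
                · -- the descent itself
                  apply char_lt_of_toNat_lt
                  obtain ⟨_, h2, _, _⟩ := hcd cut0 (by omega)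
                  obtain ⟨_, hn2, _, _⟩ := hnext
                  omega
            have hfin := toString_eq_finish
              (List.take cut0 (c0 :: c1 :: tl) ++ (PySem.Int.toStr (digs'.getD cut0 0 - 1)).toList
                ++ List.replicate (tl.length + 1 + 1 - cut0 - 1) '9')
              (by
                intro hnil
                rcases List.append_eq_nil_iff.mp hnil with ⟨h12, _⟩
                rcases List.append_eq_nil_iff.mp h12 with ⟨_, h2⟩
                exact toStr_toList_ne_nil _ h2)
            have hB : auxAltFinish
                (List.take (auxAltBack cut0 digs') (c0 :: c1 :: tl)
                  ++ (PySem.Int.toStr (digs'.getD (auxAltBack cut0 digs') 0 - 1)).toList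
                  ++ List.replicate (tl.length + 1 + 1 - auxAltBack cut0 digs' - 1) '9')
                = auxAltFinish
                (List.take cut0 (c0 :: c1 :: tl) ++ (PySem.Int.toStr (digs'.getD cut0 0 - 1)).toList
                  ++ List.replicate (tl.length + 1 + 1 - cut0 - 1) '9') := by
              rw [hback]
            exact hfin.trans hB.symm

theorem aux_changed : Claim_changed_aux := by unfold Claim_changed_aux; decide
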